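-- pv_equiv track=rewrite | github.com/georgi-lyubenov/MusicPlayer | Source & Tests/MusicCrawler.py | title_parser
-- ===== SOURCE A (Python) =====
-- def title_parser(song_name):
--     flag = False
--     title = ""
--     for symbol in song_name:
--         if symbol == "-":
--             flag = True
--         if symbol == ".":
--             flag = False
--         if symbol != "-" and flag is True:
--             title += symbol
--     return title
-- ===== SOURCE B (Python) =====
-- def title_parser(song_name):
--     # Everything after each '-' up to the next '-' or '.', joined together.
--     return ''.join(part.split('.')[0] for part in song_name.split('-')[1:])
-- ===== Notes on version B (the rewrite author's own statement) =====
-- stated objective: idiomatic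
-- what changed: Replaces the character-by-character boolean-flag automaton with a split-based one-liner: split the name on dashes, drop the leading piece, truncate each remaining piece at its first dot, and join.
import Mathlib
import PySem

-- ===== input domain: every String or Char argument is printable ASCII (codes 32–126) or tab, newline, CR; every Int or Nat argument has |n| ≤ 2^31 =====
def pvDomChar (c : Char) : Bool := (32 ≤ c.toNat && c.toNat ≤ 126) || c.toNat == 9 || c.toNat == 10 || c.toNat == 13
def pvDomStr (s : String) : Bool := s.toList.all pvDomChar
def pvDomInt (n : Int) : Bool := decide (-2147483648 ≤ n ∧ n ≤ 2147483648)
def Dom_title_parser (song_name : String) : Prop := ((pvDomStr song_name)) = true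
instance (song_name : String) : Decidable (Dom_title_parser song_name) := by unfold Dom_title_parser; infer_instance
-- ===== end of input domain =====

-- B replaces A's char-by-char flag loop by split on '-' / truncate at '.' / join (idiomatic, same values).

-- ===== PORT A =====
-- literal transliteration of A's for-loop: state (flag, title), same branch order
def title_parser (song_name : String) : String :=
  let st := song_name.toList.foldl (fun (st : Bool × List Char) symbol =>
    let flag := if symbol = '-' then true else st.1
    let flag := if symbol = '.' then false else flag
    let title := if symbol ≠ '-' ∧ flag = true then st.2 ++ [symbol] else st.2
    (flag, title)) (false, [])
  String.mk st.2

-- ===== PORT B =====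
-- port of Source B: ''.join(part.split('.')[0] for part in song_name.split('-')[1:])
-- `[0]` of split's result is its head (split never returns an empty list); `[1:]` is PySem.List.slice (some 1) none
def title_parser_alt (song_name : String) : String :=
  String.mk (PySem.Chars.join []
    ((PySem.List.slice (PySem.Chars.splitOn song_name.toList ['-']) (some 1) none).map
      (fun part => (PySem.Chars.splitOn part ['.']).headI)))

-- ===== PRECONDITION & SPEC =====
def Spec_title_parser (song_name : String) (out : String) : Prop := out = title_parser_alt song_name
instance (song_name : String) (out : String) : Decidable (Spec_title_parser song_name out) := by unfold Spec_title_parser; infer_instance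

-- ===== CLAIM (what is proved, stated in full; the proofs are below) =====
def Claim_equal_title_parser : Prop := ∀ (song_name : String), Dom_title_parser song_name → Spec_title_parser song_name (title_parser song_name)

-- ===== LEMMAS AND PROOFS =====

-- simple recursive model of splitting on a single character
def mySplit (c : Char) : List Char → List (List Char)
  | [] => [[]]
  | x :: rest =>
    if x = c then [] :: mySplit c rest
    else
      match mySplit c rest with
      | [] => [[x]]
      | p :: ps => (x :: p) :: ps

theorem mySplit_ne_nil (c : Char) (l : List Char) : mySplit c l ≠ [] := by
  cases l with
  | nil => simp [mySplit]
  | cons x rest =>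
    simp only [mySplit]
    split
    · simp
    · split <;> simp

theorem splitOn_go_eq (c : Char) : ∀ (l : List Char) (fuel : Nat) (cur : List Char) (acc : List (List Char)),
    l.length < fuel →
    PySem.Chars.splitOn.go [c] fuel l cur acc =
      acc.reverse ++ (cur.reverse ++ (mySplit c l).headI) :: (mySplit c l).tail := by
  intro l
  induction l with
  | nil =>
    intro fuel cur acc h
    match fuel, h with
    | fuel + 1, _ => simp [PySem.Chars.splitOn.go, mySplit]
  | cons x rest ih =>
    intro fuel cur acc h
    match fuel, h with
    | fuel + 1, h =>
      by_cases hx : x = c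
      · subst hx
        have hpre : [x].isPrefixOf (x :: rest) = true := by simp [List.isPrefixOf]
        simp only [PySem.Chars.splitOn.go, hpre, if_pos, List.length_cons,
          List.length_nil, List.drop_succ_cons, List.drop_zero]
        rw [ih fuel [] (cur.reverse :: acc) (by simpa using Nat.lt_of_succ_lt_succ h)]
        simp only [mySplit, if_pos rfl, List.headI_cons, List.tail_cons, List.reverse_cons,
          List.reverse_nil, List.nil_append, List.append_assoc, List.cons_append]
        have hne := mySplit_ne_nil x rest
        cases hm : mySplit x rest with
        | nil => exact absurd hm hne
        | cons p ps => simp [hm]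
      · have hpre : [c].isPrefixOf (x :: rest) = false := by
          simp [List.isPrefixOf]; exact fun hc => absurd hc.symm hx
        simp only [PySem.Chars.splitOn.go, hpre, Bool.false_eq_true, if_neg, not_false_iff]
        rw [ih fuel (x :: cur) acc (by simpa using Nat.lt_of_succ_lt_succ h)]
        have hne := mySplit_ne_nil c rest
        simp only [mySplit, hx, if_neg, not_false_iff]
        cases hm : mySplit c rest with
        | nil => exact absurd hm hne
        | cons p ps => simp [hm]

theorem splitOn_eq_mySplit (c : Char) (l : List Char) :
    PySem.Chars.splitOn l [c] = mySplit c l := by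
  unfold PySem.Chars.splitOn
  rw [splitOn_go_eq c l (l.length + 1) [] [] (by omega)]
  have hne := mySplit_ne_nil c l
  cases hm : mySplit c l with
  | nil => exact absurd hm hne
  | cons p ps => simp [hm]

theorem mySplit_headI (c : Char) (l : List Char) :
    (mySplit c l).headI = l.takeWhile (· ≠ c) := by
  induction l with
  | nil => simp [mySplit]
  | cons x rest ih =>
    by_cases hx : x = c
    · subst hx; simp [mySplit, List.takeWhile]
    · have hne := mySplit_ne_nil c rest
      simp only [mySplit, hx, if_neg, not_false_iff]
      cases hm : mySplit c rest with
      | nil => exact absurd hm hne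
      | cons p ps =>
        rw [hm] at ih
        simp only [List.headI_cons] at ih
        simp [List.takeWhile, hx, ih]

theorem join_nil_eq_flatten (ps : List (List Char)) :
    PySem.Chars.join [] ps = ps.flatten := by
  induction ps with
  | nil => simp [PySem.Chars.join, List.intercalate, List.intersperse]
  | cons p ps ih =>
    cases ps with
    | nil => simp [PySem.Chars.join, List.intercalate, List.intersperse]
    | cons q qs =>
      rw [PySem.Chars.join_cons_cons]
      simp only [List.flatten_cons]
      rw [ih]; simp

-- A's loop as a direct recursion (front-to-back), bridged to the foldl below
def loopA : List Char → Bool → List Char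
  | [], _ => []
  | x :: rest, flag0 =>
    let flag1 := if x = '-' then true else flag0
    let flag2 := if x = '.' then false else flag1
    (if x ≠ '-' ∧ flag2 = true then [x] else []) ++ loopA rest flag2

theorem foldl_eq_loopA : ∀ (l : List Char) (flag : Bool) (acc : List Char),
    (l.foldl (fun (st : Bool × List Char) symbol =>
      let flag := if symbol = '-' then true else st.1
      let flag := if symbol = '.' then false else flag
      let title := if symbol ≠ '-' ∧ flag = true then st.2 ++ [symbol] else st.2
      (flag, title)) (flag, acc)).2 = acc ++ loopA l flag := by
  intro l
  induction l with
  | nil => intro flag acc; simp [loopA]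
  | cons x rest ih =>
    intro flag acc
    simp only [List.foldl_cons, loopA]
    rw [ih]
    split <;> (try split) <;> (try split) <;> simp

def truncDot (p : List Char) : List Char := p.takeWhile (· ≠ '.')

def partsF (l : List Char) : List Char :=
  (((mySplit '-' l).drop 1).map truncDot).flatten

def partsG (l : List Char) : List Char :=
  ((mySplit '-' l).map truncDot).flatten

theorem loopA_eq_parts : ∀ (l : List Char),
    loopA l false = partsF l ∧ loopA l true = partsG l := by
  intro l
  induction l with
  | nil => simp [loopA, partsF, partsG, mySplit, truncDot]
  | cons x rest ih =>
    obtain ⟨ih1, ih2⟩ := ih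
    by_cases hx : x = '-'
    · subst hx
      constructor
      · simp only [loopA]
        simpa [partsF, partsG, mySplit] using ih2
      · simp only [loopA]
        simp only [partsG, mySplit, if_pos rfl, List.map_cons, List.flatten_cons]
        simpa [truncDot, partsG] using ih2
    · have hne := mySplit_ne_nil '-' rest
      cases hm : mySplit '-' rest with
      | nil => exact absurd hm hne
      | cons p ps =>
        have hsplit : mySplit '-' (x :: rest) = (x :: p) :: ps := by
          simp [mySplit, hx, hm]
        by_cases hd : x = '.'
        · subst hd
          constructor
          · simp only [loopA, partsF, hsplit, List.drop_one, List.tail_cons]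
            simp only [partsF, hm, List.drop_one, List.tail_cons] at ih1
            simpa using ih1
          · simp only [loopA, partsG, hsplit, List.map_cons, List.flatten_cons]
            have htr : truncDot ('.' :: p) = [] := by simp [truncDot, List.takeWhile]
            simp only [partsF, hm, List.drop_one, List.tail_cons] at ih1
            simpa [htr] using ih1
        · have htr : truncDot (x :: p) = x :: truncDot p := by
            simp [truncDot, List.takeWhile, hd]
          constructor
          · simp only [loopA, partsF, hsplit, List.drop_one, List.tail_cons]
            simp only [partsF, hm, List.drop_one, List.tail_cons] at ih1
            simpa [hx, hd] using ih1
          · simp only [loopA, partsG, hsplit, List.map_cons, List.flatten_cons, htr]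
            simp only [partsG, hm, List.map_cons, List.flatten_cons] at ih2
            simpa [hx, hd] using ih2

-- ===== VERDICT (by name: the statement is the Claim_ definition above) =====
theorem title_parser_spec : Claim_equal_title_parser := by
  intro s _
  unfold Spec_title_parser title_parser title_parser_alt
  rw [PySem.List.slice_from_one]
  simp only [foldl_eq_loopA s.toList false [], List.nil_append,
    splitOn_eq_mySplit, join_nil_eq_flatten]
  rw [(loopA_eq_parts s.toList).1]
  simp only [partsF, List.drop_one]
  congr 2
  exact (List.map_congr_left fun p _ => by
    rw [mySplit_headI]; rfl).symm
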